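-- pv_equiv track=rewrite | github.com/panbenson/adventofcode | 2022/17.py | get_rock
-- ===== SOURCE A (Python) =====
-- def get_rock(rock_num, top):
--     rock_type = rock_num % 5
--
--     # 2 from left, 3 from the top
--     from_top = top + 3 + 1
--     if rock_type == 0:
--         return [(i, from_top) for i in range(2, 2 + 4)]
--     elif rock_type == 1:
--         return [(i, from_top + 1) for i in range(2, 2 + 3)] + [(3, from_top), (3, from_top + 2)]
--     elif rock_type == 2:
--         return [(i, from_top) for i in range(2, 2 + 3)] + [(2 + 2, i) for i in range(from_top + 1, from_top + 3)]
--     elif rock_type == 3: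
--         return [(2, i) for i in range(from_top, from_top + 4)]
--     elif rock_type == 4:
--         return [(i, from_top) for i in range(2, 2 + 2)] + [(i, from_top + 1) for i in range(2, 2 + 2)]
-- ===== SOURCE B (Python) =====
-- SHAPES = [
--     [(0, 0), (1, 0), (2, 0), (3, 0)],                  # horizontal bar
--     [(0, 1), (1, 1), (2, 1), (1, 0), (1, 2)],          # plus
--     [(0, 0), (1, 0), (2, 0), (2, 1), (2, 2)],          # mirrored L
--     [(0, 0), (0, 1), (0, 2), (0, 3)],                  # vertical bar
--     [(0, 0), (1, 0), (0, 1), (1, 1)],                  # square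
-- ]
--
-- def get_rock(rock_num, top):
--     from_top = top + 4
--     return [(2 + dx, from_top + dy) for (dx, dy) in SHAPES[rock_num % 5]]
-- ===== Notes on version B (the rewrite author's own statement) =====
-- stated objective: simpler
-- what changed: Replaces the five-way if/elif chain of per-shape range comprehensions with one constant offset table indexed by rock_num % 5 and a single uniform translation pass.
import Mathlib
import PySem

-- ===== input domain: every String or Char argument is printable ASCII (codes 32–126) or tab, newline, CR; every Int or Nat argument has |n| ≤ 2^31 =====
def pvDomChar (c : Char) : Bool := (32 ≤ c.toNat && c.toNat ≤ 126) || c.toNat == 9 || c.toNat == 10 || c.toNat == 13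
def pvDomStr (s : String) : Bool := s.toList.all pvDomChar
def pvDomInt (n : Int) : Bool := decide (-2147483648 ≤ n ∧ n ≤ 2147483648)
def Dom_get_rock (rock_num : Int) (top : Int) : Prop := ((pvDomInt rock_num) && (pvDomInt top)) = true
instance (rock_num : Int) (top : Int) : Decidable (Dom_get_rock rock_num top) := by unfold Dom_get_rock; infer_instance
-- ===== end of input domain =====

-- B replaces A's five-way if/elif chain of range comprehensions with a constant
-- offset table indexed by rock_num % 5 and one uniform translation pass (simpler).


-- ===== PORT A =====
def get_rock (rock_num : Int) (top : Int) : List (Int × Int) :=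
  let rock_type := PySem.Int.mod rock_num 5
  let from_top := top + 3 + 1
  if rock_type = 0 then
    (PySem.List.pyRange 2 (2 + 4) 1).map (fun i => (i, from_top))
  else if rock_type = 1 then
    (PySem.List.pyRange 2 (2 + 3) 1).map (fun i => (i, from_top + 1))
      ++ [(3, from_top), (3, from_top + 2)]
  else if rock_type = 2 then
    (PySem.List.pyRange 2 (2 + 3) 1).map (fun i => (i, from_top))
      ++ (PySem.List.pyRange (from_top + 1) (from_top + 3) 1).map (fun i => (2 + 2, i))
  else if rock_type = 3 then
    (PySem.List.pyRange from_top (from_top + 4) 1).map (fun i => (2, i))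
  else if rock_type = 4 then
    (PySem.List.pyRange 2 (2 + 2) 1).map (fun i => (i, from_top))
      ++ (PySem.List.pyRange 2 (2 + 2) 1).map (fun i => (i, from_top + 1))
  else []  -- Python falls through returning None here; unreachable since 0 ≤ rock_num % 5 < 5

-- ===== PORT B =====
def SHAPES : List (List (Int × Int)) :=
  [[(0, 0), (1, 0), (2, 0), (3, 0)],
   [(0, 1), (1, 1), (2, 1), (1, 0), (1, 2)],
   [(0, 0), (1, 0), (2, 0), (2, 1), (2, 2)],
   [(0, 0), (0, 1), (0, 2), (0, 3)],
   [(0, 0), (1, 0), (0, 1), (1, 1)]]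

def get_rock_alt (rock_num : Int) (top : Int) : List (Int × Int) :=
  let from_top := top + 4
  -- SHAPES[rock_num % 5]: the index is always in range (0 ≤ · % 5 < 5), so getD [] is never taken
  ((PySem.List.pyGet? SHAPES (PySem.Int.mod rock_num 5)).getD []).map
    (fun p => (2 + p.1, from_top + p.2))

-- ===== PRECONDITION & SPEC =====
def Spec_get_rock (rock_num : Int) (top : Int) (out : List (Int × Int)) : Prop := out = get_rock_alt rock_num top
instance (rock_num : Int) (top : Int) (out : List (Int × Int)) : Decidable (Spec_get_rock rock_num top out) := by unfold Spec_get_rock; infer_instance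

-- ===== CLAIM (what is proved, stated in full; the proofs are below) =====
def Claim_equal_get_rock : Prop := ∀ (rock_num : Int) (top : Int), Dom_get_rock rock_num top → Spec_get_rock rock_num top (get_rock rock_num top)

-- ===== LEMMAS AND PROOFS =====
theorem mod5_cases (n : Int) :
    PySem.Int.mod n 5 = 0 ∨ PySem.Int.mod n 5 = 1 ∨ PySem.Int.mod n 5 = 2 ∨
    PySem.Int.mod n 5 = 3 ∨ PySem.Int.mod n 5 = 4 := by
  have h0 : 0 ≤ n % 5 := Int.emod_nonneg n (by norm_num)
  have h5 : n % 5 < 5 := Int.emod_lt_of_pos n (by norm_num)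
  have he : n.fmod 5 = n % 5 := by rw [Int.fmod_eq_emod]; simp
  simp only [PySem.Int.mod]
  omega

-- ===== VERDICT (by name: the statement is the Claim_ definition above) =====
theorem get_rock_spec : Claim_equal_get_rock := by
  intro rock_num top _
  unfold Spec_get_rock get_rock get_rock_alt
  rcases mod5_cases rock_num with h | h | h | h | h <;>
    rw [h] <;>
    simp [SHAPES, PySem.List.pyRange_one, PySem.List.pyGet?, PySem.List.pyIdx?,
          List.range_succ] <;> ring_nf <;> try exact ⟨trivial, trivial⟩
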